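-- pv_equiv track=rewrite | github.com/mouthwash/Spotify-Fellowship | 3.py | ChangePossibilities
-- ===== SOURCE A (Python) =====
-- def ChangePossibilities(amount, arr):
--     permutations = 0
--     multiples =[]
--     for i in arr:
--         if amount % i == 0:
--             permutations += 1
--             multiples.append(i)
--         for j in multiples:
--             if i % j == 0 and i != j:
--                 permutations += 1
--
--     return permutations
-- ===== SOURCE B (Python) =====
-- def ChangePossibilities(amount, arr):
--     total = 0
--     # one counting pass per distinct value of arr that divides amount:
--     # each occurrence of v is a hit (+1), and every later element divisible
--     # by v (other than v itself) gains one permutation per v seen so far.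
--     for v in dict.fromkeys(arr):
--         if amount % v == 0:
--             seen = 0
--             for x in arr:
--                 if x == v:
--                     seen += 1
--                     total += 1
--                 elif x % v == 0:
--                     total += seen
--     return total
-- ===== Notes on version B (the rewrite author's own statement) =====
-- stated objective: alternative
-- what changed: Replaces A's single pass with a growing multiples list rescanned at every element by one deduplication pass plus, for each distinct value dividing amount, a single counting pass over the array with a running occurrence counter (pairs are grouped by divisor value instead of by position).
import Mathlib
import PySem

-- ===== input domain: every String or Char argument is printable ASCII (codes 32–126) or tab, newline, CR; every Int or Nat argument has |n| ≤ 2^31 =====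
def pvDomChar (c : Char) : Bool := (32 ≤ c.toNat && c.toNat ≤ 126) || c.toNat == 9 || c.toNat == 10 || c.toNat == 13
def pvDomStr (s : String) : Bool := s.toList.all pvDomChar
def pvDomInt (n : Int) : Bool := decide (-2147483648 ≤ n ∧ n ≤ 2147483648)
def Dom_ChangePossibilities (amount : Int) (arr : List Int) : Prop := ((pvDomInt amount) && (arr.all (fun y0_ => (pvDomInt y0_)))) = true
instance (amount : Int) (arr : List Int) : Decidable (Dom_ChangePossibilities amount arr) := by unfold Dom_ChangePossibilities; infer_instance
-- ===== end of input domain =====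

-- B replaces A's per-element scan of the growing multiples list by one deduplication pass and,
-- for each distinct value dividing amount, a single counting pass with a running occurrence
-- counter (objective: alternative loop structure; pairs are grouped by divisor value, not by position).

-- ===== PORT A =====
def pvStepA (amount : Int) (st : Int × List Int) (i : Int) : Int × List Int :=
  let st1 := if PySem.Int.mod amount i = 0 then (st.1 + 1, st.2 ++ [i]) else st
  (st1.2.foldl (fun p j => if PySem.Int.mod i j = 0 ∧ i ≠ j then p + 1 else p) st1.1, st1.2)

def ChangePossibilities (amount : Int) (arr : List Int) : Int :=
  (arr.foldl (pvStepA amount) (0, [])).1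

-- ===== PORT B =====
-- the body of Source B's inner 'for x in arr' counting pass, for one candidate divisor v;
-- state = (total, seen)
def pvInnerStep (v : Int) (s : Int × Int) (x : Int) : Int × Int :=
  if x = v then (s.1 + 1, s.2 + 1)
  else if PySem.Int.mod x v = 0 then (s.1 + s.2, s.2)
  else s

-- dict.fromkeys(arr) = PySem.List.dedup arr
def ChangePossibilities_alt (amount : Int) (arr : List Int) : Int :=
  (PySem.List.dedup arr).foldl
    (fun t v => if PySem.Int.mod amount v = 0 then (arr.foldl (pvInnerStep v) (t, 0)).1 else t) 0

-- ===== PRECONDITION & SPEC =====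
-- Pre_ excludes arrays containing 0, on which Python's 'amount % v' raises ZeroDivisionError (in A and in B alike).
def Pre_ChangePossibilities (amount : Int) (arr : List Int) : Prop := (0 : Int) ∉ arr
instance (amount : Int) (arr : List Int) : Decidable (Pre_ChangePossibilities amount arr) := by unfold Pre_ChangePossibilities; infer_instance

def pvWitness_ChangePossibilities : Int × List Int := (12, [1, 2, 6, 4, 2])

def Spec_ChangePossibilities (amount : Int) (arr : List Int) (out : Int) : Prop := out = ChangePossibilities_alt amount arr
instance (amount : Int) (arr : List Int) (out : Int) : Decidable (Spec_ChangePossibilities amount arr out) := by unfold Spec_ChangePossibilities; infer_instance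

-- ===== CLAIM (what is proved, stated in full; the proofs are below) =====
def Claim_equal_ChangePossibilities : Prop := ∀ (amount : Int) (arr : List Int), Dom_ChangePossibilities amount arr → Pre_ChangePossibilities amount arr → Spec_ChangePossibilities amount arr (ChangePossibilities amount arr)

-- ===== LEMMAS AND PROOFS =====

-- a per-occurrence count over ms equals the count-weighted sum over any Nodup list vs
-- covering the values of ms that satisfy the test
lemma pvCountSum (q : Int → Bool) (vs : List Int) (hnd : vs.Nodup) :
    ∀ ms : List Int, (∀ x ∈ ms, q x = true → x ∈ vs) →
      ((ms.countP q : Int) = ((vs.filter q).map (fun v => (ms.count v : Int))).sum) := by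
  intro ms
  induction ms with
  | nil => intro _; simp
  | cons x ms ih =>
    intro hsub
    have hcnt : ∀ v : Int, ((x :: ms).count v : Int) = (ms.count v : Int) + (if v = x then 1 else 0) := by
      intro v
      rw [List.count_cons]
      by_cases h : v = x
      · simp [h]
      · have h2 : ¬ x = v := fun hh => h hh.symm
        simp [h, h2]
    have hmap : ((vs.filter q).map (fun v => ((x :: ms).count v : Int))).sum
        = ((vs.filter q).map (fun v => (ms.count v : Int))).sum
          + ((vs.filter q).map (fun v => if v = x then (1:Int) else 0)).sum := by
      rw [← List.sum_map_add]
      congr 1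
      exact List.map_congr_left (fun v _ => hcnt v)
    have hind : ((vs.filter q).map (fun v => if v = x then (1:Int) else 0)).sum
        = if x ∈ vs.filter q then (1:Int) else 0 := by
      have hfn : (fun v : Int => if v = x then (1:Int) else 0)
          = (fun v => if (v == x) = true then (1:Int) else 0) := by
        funext v; by_cases h : v = x <;> simp [h]
      rw [hfn, PySem.List.sum_map_ite_one_zero]
      have hco : (vs.filter q).countP (fun v => v == x) = (vs.filter q).count x := rfl
      by_cases hx : x ∈ vs.filter q
      · rw [hco, List.count_eq_one_of_mem (List.Nodup.filter _ hnd) hx]; simp [hx]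
      · rw [hco, List.count_eq_zero_of_not_mem hx]; simp [hx]
    have hsub' : ∀ y ∈ ms, q y = true → y ∈ vs :=
      fun y hy => hsub y (List.mem_cons_of_mem _ hy)
    rw [List.countP_cons, hmap, hind, ← ih hsub']
    by_cases hq : q x = true
    · have hxf : x ∈ vs.filter q := List.mem_filter.mpr ⟨hsub x (List.mem_cons_self) hq, hq⟩
      simp [hq, hxf]
    · have hxf : x ∉ vs.filter q := fun h => hq (List.mem_filter.mp h).2
      simp [hq, hxf]

-- the inner pass is additive in its starting total
lemma pvInner_shift (v : Int) (arr : List Int) : ∀ (t s : Int),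
    (arr.foldl (pvInnerStep v) (t, s)).1 = t + (arr.foldl (pvInnerStep v) (0, s)).1 := by
  induction arr with
  | nil => intro t s; simp
  | cons x arr ih =>
    intro t s
    simp only [List.foldl_cons, pvInnerStep]
    by_cases h1 : x = v
    · simp only [if_pos h1]
      rw [ih (t + 1), ih (0 + 1)]
      ring
    · by_cases h2 : PySem.Int.mod x v = 0
      · simp only [if_neg h1, if_pos h2]
        rw [ih (t + s), ih (0 + s)]
        ring
      · simp only [if_neg h1, if_neg h2]
        rw [ih t, ih 0]

-- the 'seen' component of the inner pass counts the occurrences of v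
lemma pvInner_snd (v : Int) (arr : List Int) : ∀ (t s : Int),
    (arr.foldl (pvInnerStep v) (t, s)).2 = s + (arr.count v : Int) := by
  induction arr with
  | nil => intro t s; simp
  | cons x arr ih =>
    intro t s
    simp only [List.foldl_cons, pvInnerStep]
    have hcnt : ((x :: arr).count v : Int) = (arr.count v : Int) + (if v = x then 1 else 0) := by
      rw [List.count_cons]
      by_cases h : v = x
      · simp [h]
      · have h2 : ¬ x = v := fun hh => h hh.symm
        simp [h, h2]
    rw [hcnt]
    by_cases h1 : x = v
    · simp only [if_pos h1]
      rw [ih (t + 1) (s + 1)]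
      simp [h1.symm]
      ring
    · have h1' : ¬ v = x := fun hh => h1 hh.symm
      by_cases h2 : PySem.Int.mod x v = 0
      · simp only [if_neg h1, if_pos h2]
        rw [ih (t + s) s]
        simp [h1']
      · simp only [if_neg h1, if_neg h2]
        rw [ih t s]
        simp [h1']

-- when v never occurs, the inner pass leaves the state unchanged
lemma pvInner_notmem (v : Int) (arr : List Int) (h : v ∉ arr) : ∀ t : Int,
    arr.foldl (pvInnerStep v) (t, 0) = (t, 0) := by
  induction arr with
  | nil => intro t; rfl
  | cons x arr ih =>
    intro t
    have hx : ¬ x = v := fun hh => h (hh ▸ List.mem_cons_self)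
    have htl : v ∉ arr := fun hh => h (List.mem_cons_of_mem _ hh)
    simp only [List.foldl_cons, pvInnerStep, if_neg hx]
    by_cases h2 : PySem.Int.mod x v = 0
    · simp only [if_pos h2, add_zero]
      exact (ih htl) t
    · simp only [if_neg h2]
      exact (ih htl) t

-- appending one element to the scanned list adds its contribution to the inner pass
lemma pvInner_append (v x : Int) (arr : List Int) (t : Int) :
    ((arr ++ [x]).foldl (pvInnerStep v) (t, 0)).1
      = (arr.foldl (pvInnerStep v) (t, 0)).1
        + (if x = v then (1 : Int) else if PySem.Int.mod x v = 0 then (arr.count v : Int) else 0) := by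
  rw [List.foldl_append]
  rcases hst : arr.foldl (pvInnerStep v) (t, 0) with ⟨T, s⟩
  have hs : s = (arr.count v : Int) := by
    have h2 := pvInner_snd v arr t 0
    rw [hst] at h2
    simpa using h2
  simp only [List.foldl_cons, List.foldl_nil, pvInnerStep]
  by_cases h1 : x = v
  · simp [h1]
  · by_cases h2 : PySem.Int.mod x v = 0
    · simp [h1, h2, hs]
    · simp [h1, h2]

-- B's outer fold is the sum over candidate values of their (start-independent) contribution
lemma pvB_sum (amount : Int) (arr : List Int) : ∀ (L : List Int) (t : Int),
    L.foldl (fun t v => if PySem.Int.mod amount v = 0 then (arr.foldl (pvInnerStep v) (t, 0)).1 else t) t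
      = t + (L.map (fun v => if PySem.Int.mod amount v = 0 then (arr.foldl (pvInnerStep v) (0, 0)).1 else 0)).sum := by
  intro L
  induction L with
  | nil => intro t; simp
  | cons v L ih =>
    intro t
    simp only [List.foldl_cons, List.map_cons, List.sum_cons]
    by_cases hv : PySem.Int.mod amount v = 0
    · simp only [if_pos hv]
      rw [ih, pvInner_shift v arr t 0]
      ring
    · simp only [if_neg hv]
      rw [ih]
      ring

-- the second component of A's fold collects exactly the elements dividing amount
lemma pvA_snd (amount : Int) : ∀ (arr : List Int) (p : Int) (ms : List Int),
    (arr.foldl (pvStepA amount) (p, ms)).2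
      = ms ++ arr.filter (fun i => decide (PySem.Int.mod amount i = 0)) := by
  intro arr
  induction arr with
  | nil => intro p ms; simp
  | cons i arr ih =>
    intro p ms
    simp only [List.foldl_cons]
    by_cases hmod : PySem.Int.mod amount i = 0
    · have hA : pvStepA amount (p, ms) i
          = ((ms ++ [i]).foldl (fun q j => if PySem.Int.mod i j = 0 ∧ i ≠ j then q + 1 else q) (p + 1),
             ms ++ [i]) := by
        simp [pvStepA, hmod]
      rw [hA, ih]
      simp [List.filter_cons, hmod]
    · have hA : pvStepA amount (p, ms) i
          = (ms.foldl (fun q j => if PySem.Int.mod i j = 0 ∧ i ≠ j then q + 1 else q) p, ms) := by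
        simp [pvStepA, hmod]
      rw [hA, ih]
      simp [List.filter_cons, hmod]

-- appending one element to the input adds A's hit bit plus the count of prior hits dividing it
lemma pvA_append (amount x : Int) (arr : List Int) :
    ChangePossibilities amount (arr ++ [x])
      = ChangePossibilities amount arr
        + (if PySem.Int.mod amount x = 0 then (1 : Int) else 0)
        + ((arr.filter (fun i => decide (PySem.Int.mod amount i = 0))).countP
            (fun j => decide (PySem.Int.mod x j = 0 ∧ x ≠ j)) : Int) := by
  unfold ChangePossibilities
  rw [List.foldl_append]
  rcases hst : arr.foldl (pvStepA amount) (0, []) with ⟨p, ms⟩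
  have hms : ms = arr.filter (fun i => decide (PySem.Int.mod amount i = 0)) := by
    have h2 := pvA_snd amount arr 0 []
    rw [hst] at h2
    simpa using h2
  simp only [List.foldl_cons, List.foldl_nil]
  by_cases hmod : PySem.Int.mod amount x = 0
  · have hA : pvStepA amount (p, ms) x
        = ((ms ++ [x]).foldl (fun q j => if PySem.Int.mod x j = 0 ∧ x ≠ j then q + 1 else q) (p + 1),
           ms ++ [x]) := by
      simp [pvStepA, hmod]
    rw [hA]
    simp only [List.foldl_append, List.foldl_cons, List.foldl_nil]
    rw [if_neg (by simp)]
    rw [PySem.List.foldl_ite_add_one]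
    simp [hmod, hms]
  · have hA : pvStepA amount (p, ms) x
        = (ms.foldl (fun q j => if PySem.Int.mod x j = 0 ∧ x ≠ j then q + 1 else q) p, ms) := by
      simp [pvStepA, hmod]
    rw [hA]
    rw [PySem.List.foldl_ite_add_one]
    simp [hmod, hms]

-- the per-value deltas over a Nodup candidate list collapse to a hit bit plus a filtered count-sum
lemma pvDeltaSum (amount x : Int) (cnt : Int → Int) : ∀ (L : List Int), L.Nodup →
    (L.map (fun v => if PySem.Int.mod amount v = 0 then
        (if x = v then (1 : Int) else if PySem.Int.mod x v = 0 then cnt v else 0) else 0)).sum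
      = (if PySem.Int.mod amount x = 0 ∧ x ∈ L then (1 : Int) else 0)
        + ((L.filter (fun j => decide (PySem.Int.mod amount j = 0 ∧ (PySem.Int.mod x j = 0 ∧ x ≠ j)))).map cnt).sum := by
  intro L
  induction L with
  | nil => intro _; simp
  | cons v L ih =>
    intro hnd
    have hnd' : L.Nodup := hnd.of_cons
    simp only [List.map_cons, List.sum_cons]
    by_cases hv : x = v
    · subst hv
      have hxL : x ∉ L := (List.nodup_cons.mp hnd).1
      rw [List.filter_cons_of_neg (by simp), ih hnd']
      by_cases hm : PySem.Int.mod amount x = 0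
      · simp [hm, hxL]
      · simp [hm, hxL]
    · have hmem : (x ∈ v :: L) ↔ (x ∈ L) := by
        constructor
        · intro h
          rcases List.mem_cons.mp h with h1 | h1
          · exact absurd h1 hv
          · exact h1
        · exact fun h => List.mem_cons_of_mem _ h
      by_cases ha : PySem.Int.mod amount v = 0
      · by_cases hd : PySem.Int.mod x v = 0
        · rw [List.filter_cons_of_pos (by simp [ha, hd, hv]), ih hnd']
          simp only [List.map_cons, List.sum_cons, hmem, if_neg hv, if_pos ha, if_pos hd]
          ring
        · rw [List.filter_cons_of_neg (by simp [hd]), ih hnd']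
          simp only [hmem, if_neg hv, if_pos ha, if_neg hd]
          ring
      · rw [List.filter_cons_of_neg (by simp [ha]), ih hnd']
        simp only [hmem, if_neg ha]
        ring

-- A's filtered hit count over arr equals the grouped predicate count
lemma pvAterm (amount x : Int) (arr : List Int) :
    ((arr.filter (fun i => decide (PySem.Int.mod amount i = 0))).countP
        (fun j => decide (PySem.Int.mod x j = 0 ∧ x ≠ j)) : Int)
      = (arr.countP (fun j => decide (PySem.Int.mod amount j = 0 ∧ (PySem.Int.mod x j = 0 ∧ x ≠ j))) : Int) := by
  rw [List.countP_filter]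
  congr 1
  apply List.countP_congr
  intro a _
  by_cases h1 : PySem.Int.mod x a = 0 <;> by_cases h2 : x ≠ a <;> by_cases h3 : PySem.Int.mod amount a = 0 <;>
    simp [h1, h2, h3]

lemma pvMain (amount : Int) (arr : List Int) :
    ChangePossibilities amount arr = ChangePossibilities_alt amount arr := by
  induction arr using List.reverseRecOn with
  | nil => rfl
  | append_singleton arr x ih =>
    rw [pvA_append]
    unfold ChangePossibilities_alt
    rw [PySem.List.dedup_eq_ofList, PySem.Set.ofList_append_singleton]
    have hnd : (PySem.Set.ofList arr).Nodup := PySem.Set.nodup_ofList arr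
    have hmemL : ∀ y : Int, y ∈ PySem.Set.ofList arr ↔ y ∈ arr := fun y => PySem.Set.mem_ofList arr y
    -- rewrite B over arr ++ [x] with candidate list L' as a sum, then peel the per-value deltas
    have hof : ∀ (L : List Int),
        L.foldl (fun t v => if PySem.Int.mod amount v = 0 then ((arr ++ [x]).foldl (pvInnerStep v) (t, 0)).1 else t) 0
          = (L.map (fun v => if PySem.Int.mod amount v = 0 then (arr.foldl (pvInnerStep v) (0, 0)).1 else 0)).sum
            + (L.map (fun v => if PySem.Int.mod amount v = 0 then
                (if x = v then (1 : Int) else if PySem.Int.mod x v = 0 then (arr.count v : Int) else 0) else 0)).sum := by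
      intro L
      rw [pvB_sum amount (arr ++ [x]) L 0]
      rw [← List.sum_map_add]
      have hcong : ∀ v ∈ L,
          (if PySem.Int.mod amount v = 0 then ((arr ++ [x]).foldl (pvInnerStep v) (0, 0)).1 else 0)
            = (if PySem.Int.mod amount v = 0 then (arr.foldl (pvInnerStep v) (0, 0)).1 else 0)
              + (if PySem.Int.mod amount v = 0 then
                  (if x = v then (1 : Int) else if PySem.Int.mod x v = 0 then (arr.count v : Int) else 0) else 0) := by
        intro v _
        by_cases hv : PySem.Int.mod amount v = 0
        · simp only [if_pos hv]
          exact pvInner_append v x arr 0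
        · simp [hv]
      rw [List.map_congr_left hcong]
      simp
    have hBold : ChangePossibilities_alt amount arr
        = ((PySem.Set.ofList arr).map (fun v => if PySem.Int.mod amount v = 0 then (arr.foldl (pvInnerStep v) (0, 0)).1 else 0)).sum := by
      unfold ChangePossibilities_alt
      rw [PySem.List.dedup_eq_ofList, pvB_sum amount arr (PySem.Set.ofList arr) 0]
      simp
    have hCount : ((arr.filter (fun i => decide (PySem.Int.mod amount i = 0))).countP
          (fun j => decide (PySem.Int.mod x j = 0 ∧ x ≠ j)) : Int)
        = (((PySem.Set.ofList arr).filter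
              (fun j => decide (PySem.Int.mod amount j = 0 ∧ (PySem.Int.mod x j = 0 ∧ x ≠ j)))).map
            (fun v => (arr.count v : Int))).sum := by
      rw [pvAterm]
      exact pvCountSum _ (PySem.Set.ofList arr) hnd arr (fun y hy _ => (hmemL y).mpr hy)
    by_cases hx : x ∈ arr
    · have hxL : x ∈ PySem.Set.ofList arr := (hmemL x).mpr hx
      rw [PySem.Set.add_of_mem hxL, hof (PySem.Set.ofList arr),
          pvDeltaSum amount x (fun v => (arr.count v : Int)) (PySem.Set.ofList arr) hnd,
          ih, hBold, hCount]
      simp [hxL]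
      ring
    · have hxL : x ∉ PySem.Set.ofList arr := fun h => hx ((hmemL x).mp h)
      rw [PySem.Set.add_of_not_mem hxL, hof (PySem.Set.ofList arr ++ [x])]
      simp only [List.map_append, List.sum_append, List.map_cons, List.map_nil, List.sum_cons, List.sum_nil]
      have hinner0 : (arr.foldl (pvInnerStep x) (0, 0)).1 = 0 := by
        rw [pvInner_notmem x arr hx 0]
      rw [pvDeltaSum amount x (fun v => (arr.count v : Int)) (PySem.Set.ofList arr) hnd,
          ih, hBold, hCount, hinner0]
      simp [hxL]
      by_cases hm : PySem.Int.mod amount x = 0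
      · simp [hm]; ring
      · simp [hm]

-- ===== VERDICT (by name: the statement is the Claim_ definition above) =====
theorem ChangePossibilities_spec : Claim_equal_ChangePossibilities := by
  intro amount arr _ _
  unfold Spec_ChangePossibilities
  exact pvMain amount arr
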